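-- pv_equiv track=rewrite | github.com/pypi-data/pypi-mirror-401 | packages/whatnext/whatnext-1.3.2-py3-none-any.whl/whatnext/next.py | rewind_insertion_point
-- ===== SOURCE A (Python) =====
-- def rewind_insertion_point(lines, position, min_position):
--     first_non_blank = None
--     while position > min_position:
--         line = lines[position - 1]
--         if line.startswith("- ["):
--             return position, True
--         if line.strip() != "":
--             first_non_blank = position
--         position -= 1
--     if first_non_blank is not None:
--         return first_non_blank, False
--     return min_position, False
-- ===== SOURCE B (Python) =====
-- def rewind_insertion_point(lines, position, min_position):
--     rng = range(min_position + 1, position + 1)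
--     bullet = next((p for p in reversed(rng) if lines[p - 1].startswith("- [")), None)
--     if bullet is not None:
--         return bullet, True
--     p = next((p for p in rng if lines[p - 1].strip() != ""), None)
--     if p is not None:
--         return p, False
--     return min_position, False
-- ===== Notes on version B (the rewrite author's own statement) =====
-- stated objective: alternative
-- what changed: Replaces the single backward while-loop with mutable first_non_blank state by two stateless single-purpose passes: a lazy backward search for the highest bullet line, then a forward search for the first non-blank line.
import Mathlib
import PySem

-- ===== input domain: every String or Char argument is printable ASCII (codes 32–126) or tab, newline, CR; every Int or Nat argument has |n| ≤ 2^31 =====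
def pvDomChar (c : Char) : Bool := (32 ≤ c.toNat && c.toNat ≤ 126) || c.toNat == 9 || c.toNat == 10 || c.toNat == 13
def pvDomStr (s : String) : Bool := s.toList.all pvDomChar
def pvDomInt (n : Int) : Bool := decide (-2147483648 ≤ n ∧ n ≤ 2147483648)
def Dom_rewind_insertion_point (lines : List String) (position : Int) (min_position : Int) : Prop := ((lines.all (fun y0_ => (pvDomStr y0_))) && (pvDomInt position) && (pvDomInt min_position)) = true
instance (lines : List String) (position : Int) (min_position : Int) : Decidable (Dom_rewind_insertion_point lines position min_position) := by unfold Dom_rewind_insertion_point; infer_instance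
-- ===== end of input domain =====

-- B replaces A's single backward loop with mutable first_non_blank state by two stateless
-- single-purpose passes (lazy backward bullet search, then forward first-non-blank search);
-- same cost, different decomposition.

-- ===== PORT A =====
-- the backward while-loop of A; fuel = (position - min_position).toNat counts remaining iterations
def pvLoopA (lines : List String) (min_position : Int) : Nat → Int → Option Int → Int × Bool
  | 0, _, fnb => (fnb.getD min_position, false)
  | fuel + 1, position, fnb =>
    match PySem.List.pyGet? lines (position - 1) with
    | none => (0, false)  -- IndexError in Python; excluded by Pre_
    | some line =>
      if PySem.Str.startswith line "- [" then (position, true)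
      else pvLoopA lines min_position fuel (position - 1)
             (if PySem.Str.strip line ≠ "" then some position else fnb)

def rewind_insertion_point (lines : List String) (position : Int) (min_position : Int) : Int × Bool :=
  pvLoopA lines min_position (position - min_position).toNat position none

-- ===== PORT B =====
def rewind_insertion_point_alt (lines : List String) (position : Int) (min_position : Int) : Int × Bool :=
  let rng := PySem.List.pyRange (min_position + 1) (position + 1) 1
  match rng.reverse.find? (fun p => PySem.Str.startswith (PySem.List.pyGetD lines (p - 1) "") "- [") with
  | some b => (b, true)
  | none =>
    match rng.find? (fun p => PySem.Str.strip (PySem.List.pyGetD lines (p - 1) "") ≠ "") with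
    | some p => (p, false)
    | none => (min_position, false)

-- ===== PRECONDITION & SPEC =====
-- Pre_ admits exactly the inputs on which Python A returns normally: either the scan range is
-- empty, or the top index is valid and the backward scan reaches a bullet line before (or
-- instead of) ever hitting an index below -len; everywhere else A raises IndexError (B does too).
def Pre_rewind_insertion_point (lines : List String) (position : Int) (min_position : Int) : Prop :=
  min_position < position →
    position ≤ (lines.length : Int) ∧
    ( -(lines.length : Int) ≤ min_position ∨
      ∃ p ∈ PySem.List.pyRange (1 - (lines.length : Int)) (position + 1) 1,
        min_position < p ∧ PySem.Str.startswith (PySem.List.pyGetD lines (p - 1) "") "- [" )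
instance (lines : List String) (position : Int) (min_position : Int) : Decidable (Pre_rewind_insertion_point lines position min_position) := by unfold Pre_rewind_insertion_point; infer_instance

def pvWitness_rewind_insertion_point : List String × Int × Int := (["- [x] a", "", "b"], 3, 0)

def Spec_rewind_insertion_point (lines : List String) (position : Int) (min_position : Int) (out : Int × Bool) : Prop := out = rewind_insertion_point_alt lines position min_position
instance (lines : List String) (position : Int) (min_position : Int) (out : Int × Bool) : Decidable (Spec_rewind_insertion_point lines position min_position out) := by unfold Spec_rewind_insertion_point; infer_instance

-- ===== CLAIM =====
def Claim_equal_rewind_insertion_point : Prop := ∀ (lines : List String) (position : Int) (min_position : Int), Dom_rewind_insertion_point lines position min_position → Pre_rewind_insertion_point lines position min_position → Spec_rewind_insertion_point lines position min_position (rewind_insertion_point lines position min_position)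

-- ===== LEMMAS AND PROOFS =====

-- find? over l ++ [b]
lemma pv_find?_append_last (l : List Int) (b : Int) (q : Int → Bool) :
    (l ++ [b]).find? q = ((l.find? q).orElse (fun _ => if q b then some b else none)) := by
  rw [List.find?_append]
  cases l.find? q <;> cases hq : q b <;> simp [List.find?, hq, Option.orElse]

-- invariant condition for the remaining scan range (minp, pos]: either every index is valid,
-- or some bullet position b is reached (everything from b up to pos valid)
def pvOK (lines : List String) (minp pos : Int) : Prop :=
  (∀ q : Int, minp < q → q ≤ pos → PySem.Raise.InRange lines.length (q - 1)) ∨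
  (∃ b : Int, minp < b ∧ b ≤ pos ∧
      PySem.Str.startswith (PySem.List.pyGetD lines (b - 1) "") "- [" ∧
      ∀ q : Int, b ≤ q → q ≤ pos → PySem.Raise.InRange lines.length (q - 1))

-- main loop invariant
lemma pvLoopA_spec (lines : List String) (minp : Int) :
    ∀ (fuel : Nat) (pos : Int) (fnb : Option Int),
      pos = minp + (fuel : Int) →
      pvOK lines minp pos →
      pvLoopA lines minp fuel pos fnb =
        (let rng := PySem.List.pyRange (minp + 1) (pos + 1) 1
         match rng.reverse.find? (fun p => PySem.Str.startswith (PySem.List.pyGetD lines (p - 1) "") "- [") with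
         | some b => (b, true)
         | none =>
           match rng.find? (fun p => PySem.Str.strip (PySem.List.pyGetD lines (p - 1) "") ≠ "") with
           | some p => (p, false)
           | none => (fnb.getD minp, false)) := by
  intro fuel
  induction fuel with
  | zero =>
    intro pos fnb hpos _
    have : pos + 1 ≤ minp + 1 := by omega
    simp [pvLoopA, PySem.List.pyRange_one_eq_nil this]
  | succ k ih =>
    intro pos fnb hpos H
    have hposgt : minp < pos := by omega
    have hrng : PySem.List.pyRange (minp + 1) (pos + 1) 1
        = PySem.List.pyRange (minp + 1) pos 1 ++ [pos] := by
      have := PySem.List.pyRange_one_succ_right (a := minp + 1) (b := pos) (by omega)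
      simpa using this
    have hIR : PySem.Raise.InRange lines.length (pos - 1) := by
      rcases H with H | ⟨b, hb1, hb2, _, hb4⟩
      · exact H pos hposgt le_rfl
      · exact hb4 pos hb2 le_rfl
    obtain ⟨s, hs⟩ : ∃ s, PySem.List.pyGet? lines (pos - 1) = some s := by
      cases hg : PySem.List.pyGet? lines (pos - 1) with
      | none => exact absurd hIR ((PySem.List.pyGet?_eq_none_iff lines (pos - 1)).mp hg)
      | some s => exact ⟨s, rfl⟩
    have hsD : PySem.List.pyGetD lines (pos - 1) "" = s := by
      simp [PySem.List.pyGetD, hs]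
    simp only [hrng, List.reverse_append, List.reverse_singleton, List.singleton_append]
    cases hb : PySem.Str.startswith s "- [" with
    | true =>
      have step : pvLoopA lines minp (k + 1) pos fnb = (pos, true) := by
        simp only [pvLoopA, hs]; rw [hb]; simp
      rw [step]
      have hb' : PySem.Chars.startswith s.toList ['-', ' ', '['] = true := by
        simpa [PySem.Str.startswith] using hb
      simp [List.find?, hsD, hb']
    | false =>
      have step : pvLoopA lines minp (k + 1) pos fnb
          = pvLoopA lines minp k (pos - 1)
              (if PySem.Str.strip s ≠ "" then some pos else fnb) := by
        simp only [pvLoopA, hs]; rw [hb]; simp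
      have H' : pvOK lines minp (pos - 1) := by
        rcases H with H | ⟨b, hb1, hb2, hb3, hb4⟩
        · exact Or.inl (fun q h1 h2 => H q h1 (by omega))
        · refine Or.inr ⟨b, hb1, ?_, hb3, fun q h1 h2 => hb4 q h1 (by omega)⟩
          have : b ≠ pos := by
            intro he; rw [he, hsD] at hb3; rw [hb] at hb3; exact Bool.false_ne_true hb3
          omega
      rw [step, ih (pos - 1) _ (by omega) H']
      have hpm1 : pos - 1 + 1 = pos := by omega
      simp only [hpm1, List.find?, hsD, hb]
      cases hfind : (PySem.List.pyRange (minp + 1) pos 1).reverse.find?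
          (fun p => PySem.Str.startswith (PySem.List.pyGetD lines (p - 1) "") "- [") with
      | some b => simp
      | none =>
        simp only
        rw [pv_find?_append_last]
        cases hf : (PySem.List.pyRange (minp + 1) pos 1).find?
            (fun p => decide (PySem.Str.strip (PySem.List.pyGetD lines (p - 1) "") ≠ "")) with
        | some p => simp [Option.orElse]
        | none =>
          simp only [Option.orElse, hsD]
          by_cases hnb : PySem.Str.strip s = "" <;> simp [hnb]

-- ===== VERDICT =====
theorem rewind_insertion_point_spec : Claim_equal_rewind_insertion_point := by
  intro lines position min_position _ hpre
  unfold Spec_rewind_insertion_point rewind_insertion_point rewind_insertion_point_alt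
  by_cases hlt : min_position < position
  · obtain ⟨h1, h2⟩ := hpre hlt
    have hfuel : position = min_position + ((position - min_position).toNat : Int) := by omega
    have hOK : pvOK lines min_position position := by
      rcases h2 with h2 | ⟨p, hpmem, hpmin, hpb⟩
      · exact Or.inl (fun q hq1 hq2 => by
          simp only [PySem.Raise.InRange]; omega)
      · have hpr := (PySem.List.mem_pyRange_one).mp hpmem
        exact Or.inr ⟨p, hpmin, by omega, hpb, fun q hq1 hq2 => by
          simp only [PySem.Raise.InRange]; omega⟩
    rw [pvLoopA_spec lines min_position (position - min_position).toNat position none hfuel hOK]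
    simp
  · have hf : (position - min_position).toNat = 0 := by omega
    have hnil : PySem.List.pyRange (min_position + 1) (position + 1) 1 = [] :=
      PySem.List.pyRange_one_eq_nil (by omega)
    rw [hf]
    simp [pvLoopA, hnil]
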